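-- pv_equiv track=rewrite | github.com/Habosjob/Vibe | moex_bond_endpoints_probe.py | instantiate_endpoints
-- ===== SOURCE A (Python) =====
-- BASE_URL = "https://iss.moex.com"
--
-- def instantiate_endpoints(template: str, secid: str, context: dict[str, list[str]]) -> list[str]:
--     values: list[dict[str, str]] = [
--         {
--             "[engine]": "stock",
--             "[market]": "bonds",
--             "[security]": secid,
--         }
--     ]
--
--     if "[board]" in template:
--         values = [
--             {**base, "[board]": board}
--             for base in values
--             for board in context.get("board", [])
--         ]
--     if "[boardgroup]" in template:
--         values = [
--             {**base, "[boardgroup]": boardgroup}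
--             for base in values
--             for boardgroup in context.get("boardgroup", [])
--         ]
--     if "[session]" in template:
--         values = [
--             {**base, "[session]": session}
--             for base in values
--             for session in context.get("session", ["total"])
--         ]
--
--     if not values:
--         return []
--
--     urls: list[str] = []
--     for mapping in values:
--         endpoint = template
--         for key, replacement in mapping.items():
--             endpoint = endpoint.replace(key, replacement)
--         urls.append(f"{BASE_URL}{endpoint}.json")
--     return sorted(set(urls))
-- ===== SOURCE B (Python) =====
-- BASE_URL = "https://iss.moex.com"
--
-- def _expand(endpoint, dims):
--     if not dims:
--         return [BASE_URL + endpoint + ".json"]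
--     (key, vals), rest = dims[0], dims[1:]
--     out = []
--     for v in vals:
--         out.extend(_expand(endpoint.replace(key, v), rest))
--     return out
--
-- def instantiate_endpoints(template, secid, context):
--     base = template.replace("[engine]", "stock").replace("[market]", "bonds").replace("[security]", secid)
--     dims = []
--     if "[board]" in template:
--         dims.append(("[board]", context.get("board", [])))
--     if "[boardgroup]" in template:
--         dims.append(("[boardgroup]", context.get("boardgroup", [])))
--     if "[session]" in template:
--         dims.append(("[session]", context.get("session", ["total"])))
--     return sorted(set(_expand(base, dims)))
-- ===== Notes on version B (the rewrite author's own statement) =====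
-- stated objective: alternative
-- what changed: Instead of rebuilding a list of substitution dicts three times and rendering each dict at the end, B applies the three fixed replacements once, collects the active optional dimensions into one list, and expands it with a single recursive product directly over the URL strings.
import Mathlib
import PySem

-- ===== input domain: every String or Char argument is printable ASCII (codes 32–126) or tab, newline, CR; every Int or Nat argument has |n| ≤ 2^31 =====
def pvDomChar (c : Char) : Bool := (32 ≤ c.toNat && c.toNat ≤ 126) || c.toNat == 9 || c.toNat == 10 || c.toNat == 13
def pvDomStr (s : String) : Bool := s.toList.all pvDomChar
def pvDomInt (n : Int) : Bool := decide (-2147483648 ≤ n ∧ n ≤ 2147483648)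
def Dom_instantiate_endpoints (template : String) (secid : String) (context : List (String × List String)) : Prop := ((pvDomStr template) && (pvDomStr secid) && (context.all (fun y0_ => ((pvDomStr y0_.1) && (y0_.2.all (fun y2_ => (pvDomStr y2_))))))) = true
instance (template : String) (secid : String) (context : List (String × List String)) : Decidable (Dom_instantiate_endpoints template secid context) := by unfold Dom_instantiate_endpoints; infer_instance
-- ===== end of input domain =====

-- B replaces A's three sequential rebuild-the-dict-list comprehensions by collecting the active
-- dimensions once and expanding them with a recursive product over strings (objective: alternative decomposition, same cost).

def BASE_URL : String := "https://iss.moex.com"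

-- ===== PORT A =====
def instantiate_endpoints (template : String) (secid : String) (context : List (String × List String)) : List String :=
  let ctx : PySem.Dict String (List String) := PySem.Dict.mk context
  let values : List (PySem.Dict String String) :=
    [PySem.Dict.mk [("[engine]", "stock"), ("[market]", "bonds"), ("[security]", secid)]]
  let values := if PySem.Str.isIn "[board]" template then
      values.flatMap (fun base => (ctx.getD "board" []).map (fun board => base.insert "[board]" board))
    else values
  let values := if PySem.Str.isIn "[boardgroup]" template then
      values.flatMap (fun base => (ctx.getD "boardgroup" []).map (fun boardgroup => base.insert "[boardgroup]" boardgroup))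
    else values
  let values := if PySem.Str.isIn "[session]" template then
      values.flatMap (fun base => (ctx.getD "session" ["total"]).map (fun session => base.insert "[session]" session))
    else values
  if values = [] then []
  else
    let urls : List String := values.foldl (fun urls mapping =>
      urls ++ [BASE_URL ++ mapping.items.foldl (fun endpoint kv => PySem.Str.replace endpoint kv.1 kv.2) template ++ ".json"]) []
    PySem.List.sorted (PySem.Set.ofList urls) (fun x => x) false

-- ===== PORT B =====
def pvExpand (dims : List (String × List String)) (endpoint : String) : List String :=
  match dims with
  | [] => [BASE_URL ++ endpoint ++ ".json"]
  | (key, vals) :: rest => vals.flatMap (fun v => pvExpand rest (PySem.Str.replace endpoint key v))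

def instantiate_endpoints_alt (template : String) (secid : String) (context : List (String × List String)) : List String :=
  let ctx : PySem.Dict String (List String) := PySem.Dict.mk context
  let base := PySem.Str.replace (PySem.Str.replace (PySem.Str.replace template "[engine]" "stock") "[market]" "bonds") "[security]" secid
  let dims : List (String × List String) :=
    (if PySem.Str.isIn "[board]" template then [("[board]", ctx.getD "board" [])] else []) ++
    ((if PySem.Str.isIn "[boardgroup]" template then [("[boardgroup]", ctx.getD "boardgroup" [])] else []) ++
     (if PySem.Str.isIn "[session]" template then [("[session]", ctx.getD "session" ["total"])] else []))
  PySem.List.sorted (PySem.Set.ofList (pvExpand dims base)) (fun x => x) false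

-- ===== PRECONDITION & SPEC =====
def Spec_instantiate_endpoints (template : String) (secid : String) (context : List (String × List String)) (out : List String) : Prop := out = instantiate_endpoints_alt template secid context
instance (template : String) (secid : String) (context : List (String × List String)) (out : List String) : Decidable (Spec_instantiate_endpoints template secid context out) := by unfold Spec_instantiate_endpoints; infer_instance

-- ===== CLAIM (what is proved, stated in full; the proofs are below) =====
def Claim_equal_instantiate_endpoints : Prop := ∀ (template : String) (secid : String) (context : List (String × List String)), Dom_instantiate_endpoints template secid context → Spec_instantiate_endpoints template secid context (instantiate_endpoints template secid context)

-- ===== LEMMAS AND PROOFS =====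

-- A's staged rebuilding of the dict list, one dimension at a time.
def pvStages (dims : List (String × List String)) (vs : List (PySem.Dict String String)) : List (PySem.Dict String String) :=
  match dims with
  | [] => vs
  | (k, xs) :: rest => pvStages rest (vs.flatMap (fun base => xs.map (fun x => base.insert k x)))

def pvUrl (t : String) (m : PySem.Dict String String) : String :=
  BASE_URL ++ m.items.foldl (fun endpoint kv => PySem.Str.replace endpoint kv.1 kv.2) t ++ ".json"

lemma pv_flatMap_congr {α β : Type} {l : List α} {f g : α → List β}
    (h : ∀ x ∈ l, f x = g x) : l.flatMap f = l.flatMap g := by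
  induction l with
  | nil => rfl
  | cons a l ih =>
    simp only [List.flatMap_cons]
    rw [h a (by simp), ih (fun x hx => h x (by simp [hx]))]

lemma pv_expand_eq (dims : List (String × List String)) :
    ∀ (vs : List (PySem.Dict String String)) (t : String),
    (∀ m ∈ vs, ∀ kd ∈ dims, m.contains kd.1 = false) →
    (dims.map Prod.fst).Nodup →
    (pvStages dims vs).map (pvUrl t)
      = vs.flatMap (fun m => pvExpand dims (m.items.foldl (fun endpoint kv => PySem.Str.replace endpoint kv.1 kv.2) t)) := by
  induction dims with
  | nil =>
    intro vs t _ _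
    show vs.map (pvUrl t) = _
    simp only [pvExpand]
    rw [← List.map_eq_flatMap]
    rfl
  | cons kd rest ih =>
    intro vs t hfresh hnodup
    obtain ⟨k, xs⟩ := kd
    simp only [List.map_cons, List.nodup_cons] at hnodup
    have hknodup : (rest.map Prod.fst).Nodup := hnodup.2
    have hknotin : k ∉ rest.map Prod.fst := hnodup.1
    have hstep := ih (vs.flatMap (fun base => xs.map (fun x => base.insert k x))) t ?_ hknodup
    · show (pvStages rest _).map (pvUrl t) = _
      rw [hstep, List.flatMap_assoc]
      refine pv_flatMap_congr (fun base hbase => ?_)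
      show ((xs.map (fun x => base.insert k x)).flatMap _) = pvExpand ((k, xs) :: rest) _
      simp only [List.flatMap_map, pvExpand]
      refine pv_flatMap_congr (fun x _ => ?_)
      have hfr : base.contains k = false := hfresh base hbase (k, xs) (by simp)
      have hitems : (base.insert k x).items = base.items ++ [(k, x)] := by
        simp [PySem.Dict.insert, hfr]
      simp only [hitems, List.foldl_append, List.foldl_cons, List.foldl_nil]
    · intro m hm kd' hkd'
      simp only [List.mem_flatMap, List.mem_map] at hm
      obtain ⟨base, hbase, x, _, rfl⟩ := hm
      rw [PySem.Dict.contains_insert]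
      have h1 : base.contains kd'.1 = false := hfresh base hbase kd' (by simp [hkd'])
      have h2 : (kd'.1 == k) = false := by
        refine beq_eq_false_iff_ne.mpr (fun heq => hknotin ?_)
        exact heq ▸ (List.mem_map.mpr ⟨kd', hkd', rfl⟩)
      simp [h1, h2]

lemma pv_main (dims : List (String × List String)) (template secid : String)
    (hfresh : ∀ kd ∈ dims, kd.1 ≠ "[engine]" ∧ kd.1 ≠ "[market]" ∧ kd.1 ≠ "[security]")
    (hnodup : (dims.map Prod.fst).Nodup) :
    (let values := pvStages dims [PySem.Dict.mk [("[engine]", "stock"), ("[market]", "bonds"), ("[security]", secid)]]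
     if values = [] then []
     else PySem.List.sorted (PySem.Set.ofList (values.foldl (fun urls mapping =>
        urls ++ [BASE_URL ++ mapping.items.foldl (fun endpoint kv => PySem.Str.replace endpoint kv.1 kv.2) template ++ ".json"]) [])) (fun x => x) false)
      = PySem.List.sorted (PySem.Set.ofList (pvExpand dims
          (PySem.Str.replace (PySem.Str.replace (PySem.Str.replace template "[engine]" "stock") "[market]" "bonds") "[security]" secid)))
          (fun x => x) false := by
  have hfr : ∀ m ∈ [PySem.Dict.mk [("[engine]", "stock"), ("[market]", "bonds"), ("[security]", secid)]],
      ∀ kd ∈ dims, m.contains kd.1 = false := by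
    intro m hm kd hkd
    obtain ⟨h1, h2, h3⟩ := hfresh kd hkd
    simp only [List.mem_singleton] at hm
    subst hm
    simp only [PySem.Dict.contains, List.any_cons, List.any_nil, Bool.or_false,
      Bool.or_eq_false_iff, beq_eq_false_iff_ne]
    exact ⟨fun h => h1 h.symm, fun h => h2 h.symm, fun h => h3 h.symm⟩
  have key := pv_expand_eq dims [PySem.Dict.mk [("[engine]", "stock"), ("[market]", "bonds"), ("[security]", secid)]] template hfr hnodup
  have hrw : pvExpand dims (PySem.Str.replace (PySem.Str.replace (PySem.Str.replace template "[engine]" "stock") "[market]" "bonds") "[security]" secid)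
      = (pvStages dims [PySem.Dict.mk [("[engine]", "stock"), ("[market]", "bonds"), ("[security]", secid)]]).map (pvUrl template) := by
    rw [key]; simp [List.foldl_cons, List.foldl_nil]
  rw [hrw]
  set V := pvStages dims [PySem.Dict.mk [("[engine]", "stock"), ("[market]", "bonds"), ("[security]", secid)]] with hV
  by_cases hemp : V = []
  · simp [hemp, PySem.Set.ofList, PySem.List.sorted]
  · simp only [hemp, PySem.List.foldl_append_singleton_eq_map, List.nil_append]
    rfl

-- ===== VERDICT (by name: the statement is the Claim_ definition above) =====
theorem instantiate_endpoints_spec : Claim_equal_instantiate_endpoints := by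
  intro template secid context _
  unfold Spec_instantiate_endpoints instantiate_endpoints instantiate_endpoints_alt
  have hside : ∀ dims : List (String × List String),
      (∀ kd ∈ dims, kd.1 = "[board]" ∨ kd.1 = "[boardgroup]" ∨ kd.1 = "[session]") →
      ∀ kd ∈ dims, kd.1 ≠ "[engine]" ∧ kd.1 ≠ "[market]" ∧ kd.1 ≠ "[security]" := by
    intro dims h kd hkd
    rcases h kd hkd with h' | h' | h' <;> rw [h'] <;> exact ⟨by decide, by decide, by decide⟩
  cases hb1 : PySem.Str.isIn "[board]" template <;>
  cases hb2 : PySem.Str.isIn "[boardgroup]" template <;>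
  cases hb3 : PySem.Str.isIn "[session]" template <;>
  simp only [Bool.false_eq_true, if_true, if_false,
    List.nil_append, List.append_nil, List.cons_append]
  · exact pv_main [] template secid (hside _ (by intro kd hkd; simp at hkd)) (by decide)
  · exact pv_main [("[session]", (PySem.Dict.mk context).getD "session" ["total"])] template secid
      (hside _ (by intro kd hkd; fin_cases hkd <;> simp)) (by simp only [List.map_cons, List.map_nil]; decide)
  · exact pv_main [("[boardgroup]", (PySem.Dict.mk context).getD "boardgroup" [])] template secid
      (hside _ (by intro kd hkd; fin_cases hkd <;> simp)) (by simp only [List.map_cons, List.map_nil]; decide)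
  · exact pv_main [("[boardgroup]", (PySem.Dict.mk context).getD "boardgroup" []),
        ("[session]", (PySem.Dict.mk context).getD "session" ["total"])] template secid
      (hside _ (by intro kd hkd; fin_cases hkd <;> simp)) (by simp only [List.map_cons, List.map_nil]; decide)
  · exact pv_main [("[board]", (PySem.Dict.mk context).getD "board" [])] template secid
      (hside _ (by intro kd hkd; fin_cases hkd <;> simp)) (by simp only [List.map_cons, List.map_nil]; decide)
  · exact pv_main [("[board]", (PySem.Dict.mk context).getD "board" []),
        ("[session]", (PySem.Dict.mk context).getD "session" ["total"])] template secid
      (hside _ (by intro kd hkd; fin_cases hkd <;> simp)) (by simp only [List.map_cons, List.map_nil]; decide)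
  · exact pv_main [("[board]", (PySem.Dict.mk context).getD "board" []),
        ("[boardgroup]", (PySem.Dict.mk context).getD "boardgroup" [])] template secid
      (hside _ (by intro kd hkd; fin_cases hkd <;> simp)) (by simp only [List.map_cons, List.map_nil]; decide)
  · exact pv_main [("[board]", (PySem.Dict.mk context).getD "board" []),
        ("[boardgroup]", (PySem.Dict.mk context).getD "boardgroup" []),
        ("[session]", (PySem.Dict.mk context).getD "session" ["total"])] template secid
      (hside _ (by intro kd hkd; fin_cases hkd <;> simp)) (by simp only [List.map_cons, List.map_nil]; decide)
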